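-- pv_equiv track=rewrite | github.com/ilukgolf/STD-CS350-Data_Structures-Lab1_RecursiveSearchInCharacterArray | Code without comments.py | find_lowercase_positions_recursive
-- ===== SOURCE A (Python) =====
-- def find_lowercase_positions_recursive(data, row=0, col=0, positions=None):
--     if positions is None:
--         positions = []
--     if row >= len(data):
--         return positions
--     if col >= len(data[row]):
--         return find_lowercase_positions_recursive(data, row + 1, 0, positions)
--     if data[row][col].islower():
--         positions.append((row, col, data[row][col]))
--     return find_lowercase_positions_recursive(data, row, col + 1, positions)
-- ===== SOURCE B (Python) =====
-- def find_lowercase_positions_recursive(data, row=0, col=0, positions=None):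
--     if positions is None:
--         positions = []
--     for r in range(row, len(data)):
--         rowdata = data[r]
--         for c in range(col if r == row else 0, len(rowdata)):
--             if rowdata[c].islower():
--                 positions.append((r, c, rowdata[c]))
--     return positions
-- ===== Notes on version B (the rewrite author's own statement) =====
-- stated objective: idiomatic
-- what changed: Replaced A's one-cell-per-call recursion (one Python stack frame per cell, hitting the recursion limit on large arrays) with the natural flat scan: two nested for-loops over row indices and column indices, honouring the starting col on the first row only; same in-place append to a passed-in positions list.
import Mathlib
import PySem

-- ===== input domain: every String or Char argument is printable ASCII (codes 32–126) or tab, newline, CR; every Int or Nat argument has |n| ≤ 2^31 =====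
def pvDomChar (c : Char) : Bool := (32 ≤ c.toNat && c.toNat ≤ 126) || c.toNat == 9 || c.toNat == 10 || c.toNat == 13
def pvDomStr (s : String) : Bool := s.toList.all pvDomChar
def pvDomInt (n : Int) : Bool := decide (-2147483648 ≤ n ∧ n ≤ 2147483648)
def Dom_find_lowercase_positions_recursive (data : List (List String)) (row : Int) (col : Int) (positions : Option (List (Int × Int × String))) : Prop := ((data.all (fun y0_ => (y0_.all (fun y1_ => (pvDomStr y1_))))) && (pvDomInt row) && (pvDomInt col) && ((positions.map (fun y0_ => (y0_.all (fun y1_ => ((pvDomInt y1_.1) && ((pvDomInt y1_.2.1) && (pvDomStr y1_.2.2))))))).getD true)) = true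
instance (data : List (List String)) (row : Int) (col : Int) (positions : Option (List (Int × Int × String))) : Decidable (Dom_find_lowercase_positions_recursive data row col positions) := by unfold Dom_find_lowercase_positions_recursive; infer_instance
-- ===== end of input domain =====

-- B replaces A's one-cell-per-call recursion by the natural two nested loops over row/col
-- indices (same in-place append for a caller-supplied list; equivalence proved on the return value).


-- ===== PORT A =====
-- Python str.islower(): at least one cased character and no cased character is upper-case.
-- Exact on the printable-ASCII(+tab/newline/CR) domain, where the cased characters are exactly the letters.
def pvStrIslower (s : String) : Bool :=
  s.toList.any PySem.Chars.isalpha && s.toList.all (fun c => !PySem.Chars.isupper c)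

-- A's recursion, one cell per call; data[row]/data[row][col] are Python indexings (negative
-- indices wrap); the out-of-range case (Python: IndexError) is excluded by Pre_ below,
-- the port uses the pyGetD default there.
def pvFindRec (data : List (List String)) (row : Int) (col : Int) (acc : List (Int × Int × String)) : List (Int × Int × String) :=
  if h1 : (data.length : Int) ≤ row then acc
  else
    if h2 : ((PySem.List.pyGetD data row []).length : Int) ≤ col then pvFindRec data (row + 1) 0 acc
    else
      let ch := PySem.List.pyGetD (PySem.List.pyGetD data row []) col ""
      pvFindRec data row (col + 1) (if pvStrIslower ch then acc ++ [(row, col, ch)] else acc)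
termination_by (((data.length : Int) - row).toNat, (((PySem.List.pyGetD data row []).length : Int) - col).toNat)
decreasing_by
  · apply Prod.Lex.left; omega
  · apply Prod.Lex.right' <;> omega

def find_lowercase_positions_recursive (data : List (List String)) (row : Int) (col : Int) (positions : Option (List (Int × Int × String))) : List (Int × Int × String) :=
  pvFindRec data row col (positions.getD [])

-- ===== PORT B =====
-- B's flat scan: outer loop over r in range(row, len(data)), inner loop over
-- c in range(col if r == row else 0, len(data[r])).
def pvAltLoop (data : List (List String)) (row : Int) (col : Int) (acc : List (Int × Int × String)) : List (Int × Int × String) :=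
  (PySem.List.pyRange row (data.length : Int) 1).foldl
    (fun acc1 r =>
      let rowdata := PySem.List.pyGetD data r []
      (PySem.List.pyRange (if r == row then col else 0) (rowdata.length : Int) 1).foldl
        (fun acc2 c =>
          let s := PySem.List.pyGetD rowdata c ""
          if pvStrIslower s then acc2 ++ [(r, c, s)] else acc2)
        acc1)
    acc

def find_lowercase_positions_recursive_alt (data : List (List String)) (row : Int) (col : Int) (positions : Option (List (Int × Int × String))) : List (Int × Int × String) :=
  pvAltLoop data row col (positions.getD [])

-- ===== PRECONDITION & SPEC =====
-- Pre_ excludes exactly the inputs on which Python A raises IndexError: a starting row below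
-- -len(data) (with row < len(data)), or on the first visited row a starting col below
-- -len(data[row]) (or col < 0 on an empty first row).
def Pre_find_lowercase_positions_recursive (data : List (List String)) (row : Int) (col : Int) (positions : Option (List (Int × Int × String))) : Prop :=
  (data.length : Int) ≤ row ∨
  ( -(data.length : Int) ≤ row ∧
    (let rd := PySem.List.pyGetD data row [];
     if rd.length = 0 then 0 ≤ col else -((rd.length : Int)) ≤ col) )
instance (data : List (List String)) (row : Int) (col : Int) (positions : Option (List (Int × Int × String))) : Decidable (Pre_find_lowercase_positions_recursive data row col positions) := by unfold Pre_find_lowercase_positions_recursive; infer_instance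

def pvWitness_find_lowercase_positions_recursive : List (List String) × Int × Int × (Option (List (Int × Int × String))) :=
  ([["a", "B"], ["x!"]], 0, 0, none)

def Spec_find_lowercase_positions_recursive (data : List (List String)) (row : Int) (col : Int) (positions : Option (List (Int × Int × String))) (out : List (Int × Int × String)) : Prop := out = find_lowercase_positions_recursive_alt data row col positions
instance (data : List (List String)) (row : Int) (col : Int) (positions : Option (List (Int × Int × String))) (out : List (Int × Int × String)) : Decidable (Spec_find_lowercase_positions_recursive data row col positions out) := by unfold Spec_find_lowercase_positions_recursive; infer_instance

-- ===== CLAIM (what is proved, stated in full; the proofs are below) =====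
def Claim_equal_find_lowercase_positions_recursive : Prop := ∀ (data : List (List String)) (row : Int) (col : Int) (positions : Option (List (Int × Int × String))), Dom_find_lowercase_positions_recursive data row col positions → Pre_find_lowercase_positions_recursive data row col positions → Spec_find_lowercase_positions_recursive data row col positions (find_lowercase_positions_recursive data row col positions)

-- ===== LEMMAS AND PROOFS =====

-- stepping pvAltLoop to the next row once the current row's columns are exhausted
theorem pvAltLoop_step_row (data : List (List String)) (row col : Int) (acc : List (Int × Int × String))
    (h1 : row < (data.length : Int)) (h2 : ((PySem.List.pyGetD data row []).length : Int) ≤ col) :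
    pvAltLoop data row col acc = pvAltLoop data (row + 1) 0 acc := by
  unfold pvAltLoop
  rw [PySem.List.pyRange_one_cons h1]
  simp [PySem.List.pyRange_one_eq_nil h2]
  apply PySem.List.foldl_congr_mem
  intro a x hx
  have hxr : row < x := ((PySem.List.mem_pyRange_one).1 hx).1
  rw [if_neg (by omega : ¬ x = row)]

-- stepping pvAltLoop to the next column inside the current row
theorem pvAltLoop_step_col (data : List (List String)) (row col : Int) (acc : List (Int × Int × String))
    (h1 : row < (data.length : Int)) (h2 : col < ((PySem.List.pyGetD data row []).length : Int)) :
    pvAltLoop data row col acc = pvAltLoop data row (col + 1)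
      (if pvStrIslower (PySem.List.pyGetD (PySem.List.pyGetD data row []) col "") then
        acc ++ [(row, col, PySem.List.pyGetD (PySem.List.pyGetD data row []) col "")] else acc) := by
  unfold pvAltLoop
  rw [PySem.List.pyRange_one_cons h1]
  rw [List.foldl_cons, List.foldl_cons]
  simp only [beq_self_eq_true, if_true]
  rw [PySem.List.pyRange_one_cons h2, List.foldl_cons]
  apply PySem.List.foldl_congr_mem
  intro a x hx
  have hxr : row < x := ((PySem.List.mem_pyRange_one).1 hx).1
  have hne : (x == row) = false := by simp; omega
  rw [hne]
  simp

theorem pvFindRec_eq_altLoop (data : List (List String)) (row : Int) (col : Int) (acc : List (Int × Int × String)) :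
    pvFindRec data row col acc = pvAltLoop data row col acc := by
  induction row, col, acc using pvFindRec.induct data with
  | case1 row col acc h1 =>
    rw [pvFindRec]
    simp [h1, pvAltLoop, PySem.List.pyRange_one_eq_nil h1]
  | case2 row col acc h1 h2 ih =>
    rw [pvFindRec, dif_neg h1, dif_pos h2, ih,
      ← pvAltLoop_step_row data row col acc (by omega) h2]
  | case3 row col acc h1 h2 ch ih =>
    rw [pvFindRec, dif_neg h1, dif_neg h2]
    simp only [dite_eq_ite] at ih
    exact ih.trans (pvAltLoop_step_col data row col acc (by omega) (by omega)).symm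

-- ===== VERDICT (by name: the statement is the Claim_ definition above) =====
theorem find_lowercase_positions_recursive_spec : Claim_equal_find_lowercase_positions_recursive := by
  intro data row col positions _ _
  unfold Spec_find_lowercase_positions_recursive find_lowercase_positions_recursive find_lowercase_positions_recursive_alt
  exact pvFindRec_eq_altLoop data row col (positions.getD [])
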